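-- pv_equiv track=rewrite | github.com/cuongmpdev/datamining | backend/algorithms/reduct.py | is_reduct
-- ===== SOURCE A (Python) =====
-- from typing import Any, Dict, List, Tuple, Set
--
-- def is_reduct(rows: List[Dict[str, Any]], attrs: List[str], decision_attr: str) -> bool:
--     if not attrs:
--         return False
--
--     # Group rows by conditional attributes
--     groups: Dict[Tuple[Any, ...], List[int]] = {}
--     for idx, row in enumerate(rows):
--         key = tuple(row[a] for a in attrs)
--         groups.setdefault(key, []).append(idx)
--
--     # Check if each group has consistent decisions
--     for group_indices in groups.values():
--         decisions = set(rows[i][decision_attr] for i in group_indices)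
--         if len(decisions) > 1:  # Inconsistent decisions in this group
--             return False
--
--     return True
-- ===== SOURCE B (Python) =====
-- def is_reduct(rows, attrs, decision_attr):
--     if not attrs:
--         return False
--     seen = {}
--     for row in rows:
--         key = tuple(row[a] for a in attrs)
--         d = row[decision_attr]
--         if key in seen:
--             if seen[key] != d:
--                 return False
--         else:
--             seen[key] = d
--     return True
-- ===== Notes on version B (the rewrite author's own statement) =====
-- stated objective: simpler
-- what changed: Instead of building key->index-lists groups and then a second pass forming a decision set per group, B makes a single pass keeping one dict key->first decision and fails on the first conflicting row, with early exit.
import Mathlib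
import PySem

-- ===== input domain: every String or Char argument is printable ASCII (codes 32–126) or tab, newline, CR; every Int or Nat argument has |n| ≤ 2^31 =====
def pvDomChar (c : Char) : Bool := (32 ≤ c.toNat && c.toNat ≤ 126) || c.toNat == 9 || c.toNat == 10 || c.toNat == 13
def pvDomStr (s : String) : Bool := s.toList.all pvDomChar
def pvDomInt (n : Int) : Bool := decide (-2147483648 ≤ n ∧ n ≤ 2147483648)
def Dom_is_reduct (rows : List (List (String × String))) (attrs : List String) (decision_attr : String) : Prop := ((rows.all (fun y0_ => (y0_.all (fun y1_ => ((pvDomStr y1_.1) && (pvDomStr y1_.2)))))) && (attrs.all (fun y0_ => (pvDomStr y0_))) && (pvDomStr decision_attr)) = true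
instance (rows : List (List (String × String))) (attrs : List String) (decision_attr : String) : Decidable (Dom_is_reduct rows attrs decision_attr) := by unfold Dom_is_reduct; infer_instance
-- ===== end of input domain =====

-- B replaces A's two passes (group rows into key->index-lists, then form a decision set per group)
-- by one pass keeping a dict key->first decision that fails on the first conflicting row.

-- row[a] for a dict row; total with default "" — exact under Pre_, which guarantees the key is present
def rowGetD (row : List (String × String)) (a : String) : String :=
  (PySem.Dict.mk row).getD a ""

-- tuple(row[a] for a in attrs)
def keyOf (attrs : List String) (row : List (String × String)) : List String :=
  attrs.map (fun a => rowGetD row a)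

-- ===== PORT A =====
def is_reduct (rows : List (List (String × String))) (attrs : List String) (decision_attr : String) : Bool :=
  if attrs.isEmpty then false else
  -- groups.setdefault(key, []).append(idx)  ==  modify key [] (· ++ [idx])
  let groups : PySem.Dict (List String) (List Int) :=
    (PySem.List.enumerate rows).foldl
      (fun d p => d.modify (keyOf attrs p.2) [] (· ++ [p.1])) PySem.Dict.empty
  groups.values.all (fun group_indices =>
    let decisions := PySem.Set.ofList
      (group_indices.map (fun i => rowGetD (PySem.List.pyGetD rows i []) decision_attr))
    !(decide (1 < decisions.length)))

-- ===== PORT B =====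
def altLoop (attrs : List String) (decision_attr : String)
    (rs : List (List (String × String))) (seen : PySem.Dict (List String) String) : Bool :=
  match rs with
  | [] => true
  | row :: rest =>
    let key := keyOf attrs row
    let d := rowGetD row decision_attr
    match seen.get? key with
    | some d' => if d' ≠ d then false else altLoop attrs decision_attr rest seen
    | none => altLoop attrs decision_attr rest (seen.insert key d)

def is_reduct_alt (rows : List (List (String × String))) (attrs : List String) (decision_attr : String) : Bool :=
  if attrs.isEmpty then false else
  altLoop attrs decision_attr rows PySem.Dict.empty

-- ===== PRECONDITION & SPEC =====
-- Pre_ excludes exactly the inputs where the Python raises KeyError: with attrs nonempty,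
-- some row missing one of the attrs or missing decision_attr.
def Pre_is_reduct (rows : List (List (String × String))) (attrs : List String) (decision_attr : String) : Prop :=
  attrs = [] ∨ ∀ row ∈ rows, (∀ a ∈ attrs, a ∈ row.map Prod.fst) ∧ decision_attr ∈ row.map Prod.fst
instance (rows : List (List (String × String))) (attrs : List String) (decision_attr : String) : Decidable (Pre_is_reduct rows attrs decision_attr) := by unfold Pre_is_reduct; infer_instance

def pvWitness_is_reduct : (List (List (String × String))) × List String × String :=
  ([[("a", "1"), ("d", "y")], [("a", "1"), ("d", "y")], [("a", "2"), ("d", "n")]], ["a"], "d")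

def Spec_is_reduct (rows : List (List (String × String))) (attrs : List String) (decision_attr : String) (out : Bool) : Prop := out = is_reduct_alt rows attrs decision_attr
instance (rows : List (List (String × String))) (attrs : List String) (decision_attr : String) (out : Bool) : Decidable (Spec_is_reduct rows attrs decision_attr out) := by unfold Spec_is_reduct; infer_instance

-- ===== CLAIM (what is proved, stated in full; the proofs are below) =====
def Claim_equal_is_reduct : Prop := ∀ (rows : List (List (String × String))) (attrs : List String) (decision_attr : String), Dom_is_reduct rows attrs decision_attr → Pre_is_reduct rows attrs decision_attr → Spec_is_reduct rows attrs decision_attr (is_reduct rows attrs decision_attr)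

-- ===== LEMMAS AND PROOFS =====

-- both sides decide this proposition (for nonempty attrs)
def Consistent (rows : List (List (String × String))) (attrs : List String) (decision_attr : String) : Prop :=
  ∀ r ∈ rows, ∀ r' ∈ rows, keyOf attrs r = keyOf attrs r' → rowGetD r decision_attr = rowGetD r' decision_attr

lemma altLoop_iff (attrs : List String) (decision_attr : String)
    (rs : List (List (String × String))) (seen : PySem.Dict (List String) String) :
    altLoop attrs decision_attr rs seen = true ↔
      ((∀ r ∈ rs, ∀ v, seen.get? (keyOf attrs r) = some v → rowGetD r decision_attr = v) ∧
       Consistent rs attrs decision_attr) := by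
  induction rs generalizing seen with
  | nil => simp [altLoop, Consistent]
  | cons row rest ih =>
    rcases hg : seen.get? (keyOf attrs row) with _ | d'
    · -- key not seen yet
      simp only [altLoop, hg]
      rw [ih]
      constructor
      · rintro ⟨hcomp, hcons⟩
        refine ⟨?_, ?_⟩
        · intro r hr v hv
          rcases List.mem_cons.mp hr with hr | hr
          · subst hr; rw [hg] at hv; cases hv
          · have := hcomp r hr v
            rw [PySem.Dict.get?_insert] at this
            by_cases hk : keyOf attrs r = keyOf attrs row
            · rw [hk] at hv; rw [hg] at hv; cases hv
            · exact this (by rw [if_neg hk]; exact hv)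
        · intro r hr r' hr' hk
          rcases List.mem_cons.mp hr with hr | hr <;> rcases List.mem_cons.mp hr' with hr' | hr'
          · rw [hr, hr']
          · rw [hr] at hk ⊢
            have := hcomp r' hr' (rowGetD row decision_attr)
            rw [PySem.Dict.get?_insert, if_pos hk.symm] at this
            exact (this rfl).symm
          · rw [hr'] at hk ⊢
            have := hcomp r hr (rowGetD row decision_attr)
            rw [PySem.Dict.get?_insert, if_pos hk] at this
            exact this rfl
          · exact hcons r hr r' hr' hk
      · rintro ⟨hcomp, hcons⟩
        refine ⟨?_, ?_⟩
        · intro r hr v hv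
          rw [PySem.Dict.get?_insert] at hv
          by_cases hk : keyOf attrs r = keyOf attrs row
          · rw [if_pos hk] at hv
            cases hv
            exact hcons r (List.mem_cons_of_mem _ hr) row (List.mem_cons_self) hk
          · rw [if_neg hk] at hv
            exact hcomp r (List.mem_cons_of_mem _ hr) v hv
        · intro r hr r' hr' hk
          exact hcons r (List.mem_cons_of_mem _ hr) r' (List.mem_cons_of_mem _ hr') hk
    · -- key seen with decision d'
      simp only [altLoop, hg]
      by_cases hd : d' = rowGetD row decision_attr
      · rw [if_neg (by simp [hd]), ih]
        constructor
        · rintro ⟨hcomp, hcons⟩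
          refine ⟨?_, ?_⟩
          · intro r hr v hv
            rcases List.mem_cons.mp hr with hr | hr
            · subst hr; rw [hg] at hv; cases hv; exact hd.symm
            · exact hcomp r hr v hv
          · intro r hr r' hr' hk
            rcases List.mem_cons.mp hr with hr | hr <;> rcases List.mem_cons.mp hr' with hr' | hr'
            · rw [hr, hr']
            · rw [hr] at hk ⊢
              have := hcomp r' hr' d' (by rw [← hk]; exact hg)
              rw [this, hd]
            · rw [hr'] at hk ⊢
              have := hcomp r hr d' (by rw [hk]; exact hg)
              rw [this, hd]
            · exact hcons r hr r' hr' hk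
        · rintro ⟨hcomp, hcons⟩
          exact ⟨fun r hr v hv => hcomp r (List.mem_cons_of_mem _ hr) v hv,
                 fun r hr r' hr' hk => hcons r (List.mem_cons_of_mem _ hr) r' (List.mem_cons_of_mem _ hr') hk⟩
      · rw [if_pos (by simp [hd])]
        simp only [Bool.false_eq_true, false_iff]
        rintro ⟨hcomp, _⟩
        exact hd (hcomp row (List.mem_cons_self) d' hg).symm

lemma is_reduct_alt_iff (rows : List (List (String × String))) (attrs : List String)
    (decision_attr : String) (h : attrs ≠ []) :
    is_reduct_alt rows attrs decision_attr = true ↔ Consistent rows attrs decision_attr := by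
  rw [is_reduct_alt, if_neg (by simpa using h), altLoop_iff]
  simp [PySem.Dict.get?_empty]

lemma nodup_len_le_one {α : Type} (s : List α) (hnd : s.Nodup) :
    (¬ 1 < s.length) ↔ ∀ x ∈ s, ∀ y ∈ s, x = y := by
  match s with
  | [] => simp
  | [a] => simp
  | a :: b :: t =>
    constructor
    · intro h; exact absurd (by simp : 1 < (a :: b :: t).length) h
    · intro h; exfalso
      have hab : a = b := h a (by simp) b (by simp)
      exact (List.nodup_cons.mp hnd).1 (hab ▸ List.mem_cons_self)

lemma is_reduct_iff (rows : List (List (String × String))) (attrs : List String)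
    (decision_attr : String) (h : attrs ≠ []) :
    is_reduct rows attrs decision_attr = true ↔ Consistent rows attrs decision_attr := by
  rw [is_reduct, if_neg (by simpa using h)]
  simp only []
  set l := PySem.List.enumerate rows with hl
  set groups := l.foldl (fun d p => d.modify (keyOf attrs p.2) [] (· ++ [p.1]))
      (PySem.Dict.empty : PySem.Dict (List String) (List Int)) with hg
  have hnd : groups.keys.Nodup := by
    rw [hg]
    exact PySem.Dict.nodup_keys_foldl_modify_key l (fun p => keyOf attrs p.2) [] _ _ (by simp)
  have hkeys : groups.keys = PySem.Set.ofList (l.map (fun p => keyOf attrs p.2)) := by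
    rw [hg, PySem.Dict.keys_foldl_modify_key]
    rfl
  have hgetD : ∀ k, groups.getD k []
      = ((l.map (fun p => (keyOf attrs p.2, p.1))).filter (fun q => q.1 == k)).map (·.2) := by
    intro k
    have hfm : (l.map (fun p => (keyOf attrs p.2, p.1))).foldl
        (fun d q => d.modify q.1 [] (· ++ [q.2])) (PySem.Dict.empty : PySem.Dict (List String) (List Int))
        = l.foldl (fun d p => d.modify (keyOf attrs p.2) [] (· ++ [p.1])) PySem.Dict.empty := by
      rw [List.foldl_map]
    rw [hg, ← hfm, PySem.Dict.getD_foldl_modify_append]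
    simp
  rw [PySem.Dict.values_eq_map_keys groups hnd [], hkeys]
  rw [List.all_map, List.all_eq_true]
  have hpy : ∀ (m : Nat) (hm : m < rows.length), PySem.List.pyGetD rows (m : Int) [] = rows[m] := by
    intro m hm
    simp [List.getElem?_eq_getElem hm]
  have hgrp : ∀ (k : List String) (i : Int),
      (i ∈ ((l.map (fun p => (keyOf attrs p.2, p.1))).filter (fun q => q.1 == k)).map (·.2)) ↔
      ∃ (m : Nat) (hm : m < rows.length), i = (m : Int) ∧ keyOf attrs rows[m] = k := by
    intro k i
    simp only [List.mem_map, List.mem_filter, List.mem_map, hl,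
      PySem.List.mem_enumerate_iff, beq_iff_eq]
    constructor
    · rintro ⟨q, ⟨⟨p, ⟨m, hm, rfl⟩, rfl⟩, hq⟩, rfl⟩
      exact ⟨m, hm, by simpa using hq⟩
    · rintro ⟨m, hm, rfl, hk⟩
      exact ⟨(keyOf attrs rows[m], (m : Int)), ⟨⟨((m : Int), rows[m]), ⟨m, hm, by simp⟩, rfl⟩, by simpa using hk⟩, rfl⟩
  have hpred : ∀ (k : List String),
      ((!decide (1 < (PySem.Set.ofList ((groups.getD k []).map
          (fun i => rowGetD (PySem.List.pyGetD rows i []) decision_attr))).length)) = true) ↔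
      ∀ x ∈ (groups.getD k []).map (fun i => rowGetD (PySem.List.pyGetD rows i []) decision_attr),
      ∀ y ∈ (groups.getD k []).map (fun i => rowGetD (PySem.List.pyGetD rows i []) decision_attr),
        x = y := by
    intro k
    rw [Bool.not_eq_eq_eq_not, Bool.not_true, decide_eq_false_iff_not,
      nodup_len_le_one _ (PySem.Set.nodup_ofList _)]
    constructor
    · intro hall x hx y hy
      exact hall x ((PySem.Set.mem_ofList _ _).mpr hx) y ((PySem.Set.mem_ofList _ _).mpr hy)
    · intro hall x hx y hy
      exact hall x ((PySem.Set.mem_ofList _ _).mp hx) y ((PySem.Set.mem_ofList _ _).mp hy)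
  constructor
  · intro H r hr r' hr' hkk
    obtain ⟨m, hm, rfl⟩ := List.mem_iff_getElem.mp hr
    obtain ⟨m', hm', rfl⟩ := List.mem_iff_getElem.mp hr'
    have hkmem : keyOf attrs rows[m] ∈ PySem.Set.ofList (l.map (fun p => keyOf attrs p.2)) := by
      refine (PySem.Set.mem_ofList _ _).mpr (List.mem_map.mpr ⟨((m : Int), rows[m]), ?_, rfl⟩)
      rw [hl]; exact (PySem.List.mem_enumerate_iff _ _ _).mpr ⟨m, hm, by simp⟩
    have H1 := H _ hkmem
    simp only [Function.comp] at H1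
    rw [hpred] at H1
    have h1 : rowGetD (PySem.List.pyGetD rows (m : Int) []) decision_attr
        ∈ (groups.getD (keyOf attrs rows[m]) []).map
          (fun i => rowGetD (PySem.List.pyGetD rows i []) decision_attr) :=
      List.mem_map.mpr ⟨(m : Int), by rw [hgetD, hgrp]; exact ⟨m, hm, rfl, rfl⟩, rfl⟩
    have h2 : rowGetD (PySem.List.pyGetD rows (m' : Int) []) decision_attr
        ∈ (groups.getD (keyOf attrs rows[m]) []).map
          (fun i => rowGetD (PySem.List.pyGetD rows i []) decision_attr) :=
      List.mem_map.mpr ⟨(m' : Int), by rw [hgetD, hgrp]; exact ⟨m', hm', rfl, hkk.symm⟩, rfl⟩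
    have := H1 _ h1 _ h2
    rwa [hpy m hm, hpy m' hm'] at this
  · intro Hc k hk
    simp only [Function.comp]
    rw [hpred]
    intro x hx y hy
    obtain ⟨i, hi, rfl⟩ := List.mem_map.mp hx
    obtain ⟨j, hj, rfl⟩ := List.mem_map.mp hy
    rw [hgetD, hgrp] at hi hj
    obtain ⟨m, hm, rfl, hkm⟩ := hi
    obtain ⟨m', hm', rfl, hkm'⟩ := hj
    rw [hpy m hm, hpy m' hm']
    exact Hc rows[m] (List.mem_iff_getElem.mpr ⟨m, hm, rfl⟩)
      rows[m'] (List.mem_iff_getElem.mpr ⟨m', hm', rfl⟩) (by rw [hkm, hkm'])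

-- ===== VERDICT (by name: the statement is the Claim_ definition above) =====
theorem is_reduct_spec : Claim_equal_is_reduct := by
  intro rows attrs decision_attr _ _
  unfold Spec_is_reduct
  by_cases h : attrs = []
  · subst h; simp [is_reduct, is_reduct_alt]
  · rw [Bool.eq_iff_iff, is_reduct_iff rows attrs decision_attr h,
        is_reduct_alt_iff rows attrs decision_attr h]
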